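-- pv_equiv track=rewrite | github.com/cool4zbl/learning-algorithms | algorithm/lccup-22fall/2.transpotHub.py | transportationHub
-- ===== SOURCE A (Python) =====
-- from typing import List
--
-- def transportationHub(path: List[List[int]]) -> int:
--     indeg = [0] * 1000
--     outdeg = [0] * 1000
--
--     station = set()
--
--     for p in path:
--         start, end = p
--         indeg[end] += 1
--         outdeg[start] += 1
--         station.add(start)
--         station.add(end)
--
--     n = len(station)
--
--     for s in station:
--         if indeg[s] == n - 1 and outdeg[s] == 0:
--             return s
--
--     return -1
-- ===== SOURCE B (Python) =====
-- from typing import List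
--
-- def transportationHub(path: List[List[int]]) -> int:
--     starts = {s for s, e in path}
--     ends = sorted(e for s, e in path)
--     n = len(starts | set(ends))
--     m = len(ends)
--     i = 0
--     while i < m:
--         v = ends[i]
--         j = i
--         while j < m and ends[j] == v:
--             j += 1
--         if j - i == n - 1 and v not in starts:
--             return v
--         i = j
--     return -1
-- ===== Notes on version B (the rewrite author's own statement) =====
-- stated objective: alternative
-- what changed: B drops A's two 1000-slot degree arrays and set scan: it sorts the list of edge ends and scans its runs, a run of length n-1 whose value never occurs as an edge start is the hub.
-- outside the precondition, e.g. on transportationHub([[0, -1000]]): A returns -1, B returns -1000; on transportationHub([[5, 10], [5, 10], [5, 2], [5, 2]]): A returns 10, B returns 2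
import Mathlib
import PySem

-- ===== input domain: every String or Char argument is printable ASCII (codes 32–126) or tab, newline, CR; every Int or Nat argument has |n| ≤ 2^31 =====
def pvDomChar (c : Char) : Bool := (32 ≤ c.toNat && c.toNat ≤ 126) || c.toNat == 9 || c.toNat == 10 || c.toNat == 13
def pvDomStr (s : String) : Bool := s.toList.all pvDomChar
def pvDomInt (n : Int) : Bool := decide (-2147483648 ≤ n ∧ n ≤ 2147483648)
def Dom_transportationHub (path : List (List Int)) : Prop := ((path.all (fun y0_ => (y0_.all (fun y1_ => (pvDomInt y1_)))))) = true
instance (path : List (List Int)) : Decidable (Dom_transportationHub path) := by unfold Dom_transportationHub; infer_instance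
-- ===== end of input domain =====

-- B replaces A's two 1000-slot degree arrays and set scan by sorting the edge-end list and
-- scanning its runs (alternative algorithm; no speed claim).

-- ===== PORT A =====
-- 'start, end = p' on a two-element row; any other row length raises ValueError in Python
-- and is excluded by Pre_, so the (0, 0) fallback is never reached on admitted inputs.
def pairOf (p : List Int) : Int × Int :=
  match p with
  | [a, b] => (a, b)
  | _ => (0, 0)

-- The 1000-slot lists indeg/outdeg are modeled as total maps Int → Int keyed by the slot
-- i mod 1000 actually addressed: exact for every index -1000 ≤ i < 1000 (Python's negative
-- indices wrap to i + 1000 = i mod 1000); outside that range Python raises IndexError (excluded by Pre_).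
def transportationHub (path : List (List Int)) : Int :=
  let st := path.foldl
    (fun (st : (Int → Int) × (Int → Int) × PySem.Set Int) p =>
      ((fun x => if x = PySem.Int.mod (pairOf p).2 1000 then st.1 x + 1 else st.1 x),
       (fun x => if x = PySem.Int.mod (pairOf p).1 1000 then st.2.1 x + 1 else st.2.1 x),
       (st.2.2.add (pairOf p).1).add (pairOf p).2))
    ((fun _ => 0), (fun _ => 0), PySem.Set.empty)
  let n : Int := PySem.List.len st.2.2
  match st.2.2.find? (fun s => st.1 (PySem.Int.mod s 1000) == n - 1 && st.2.1 (PySem.Int.mod s 1000) == 0) with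
  | some s => s
  | none => -1

-- ===== PORT B =====
-- Source B's outer while loop: walk the sorted end-list run by run (i → j becomes takeWhile/dropWhile).
def runScan (starts : PySem.Set Int) (n : Int) : List Int → Int
  | [] => -1
  | v :: t =>
    if ((1 + (t.takeWhile (· == v)).length : Int) == n - 1 && !(starts.contains v)) then v
    else runScan starts n (t.dropWhile (· == v))
termination_by l => l.length
decreasing_by simpa using Nat.lt_succ_of_le (List.length_dropWhile_le _ t)

-- 's, e' unpacking in Source B's comprehensions reuses pairOf (rows of any other length raise
-- ValueError in Python — excluded by Pre_, so the (0, 0) fallback is never reached).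
def transportationHub_alt (path : List (List Int)) : Int :=
  let starts : PySem.Set Int := PySem.Set.ofList (path.map (fun p => (pairOf p).1))
  let ends := PySem.List.sorted (path.map (fun p => (pairOf p).2)) (fun x => x) false
  let n : Int := PySem.List.len (starts.union (PySem.Set.ofList ends))
  runScan starts n ends

-- ===== PRECONDITION & SPEC =====
def rowsOK (path : List (List Int)) : Prop :=
  ∀ p ∈ path, p.length = 2 ∧ ∀ x ∈ p, -1000 ≤ x ∧ x < 1000

def isHub (path : List (List Int)) (s : Int) : Prop :=
  (path.countP (fun p => (p.drop 1).headD 0 == s) : Int)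
      = ((PySem.List.dedup path.flatten).length : Int) - 1
  ∧ path.countP (fun p => p.headD 0 == s) = 0

-- Pre_ excludes the inputs where A raises (a row without exactly two entries: ValueError; an id
-- outside [-1000, 1000): IndexError), the inputs where two distinct station ids share a degree
-- slot modulo 1000 — an accident of Python's negative-index wraparound, which makes A conflate
-- stations s and s - 1000 — and the tie case of two distinct hub stations, where A's answer is
-- whichever one its set iteration happens to yield first.
def Pre_transportationHub (path : List (List Int)) : Prop :=
  rowsOK path ∧
  (∀ s ∈ path.flatten, ∀ t ∈ path.flatten,
      PySem.Int.mod s 1000 = PySem.Int.mod t 1000 → s = t) ∧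
  ∀ s ∈ path.flatten, ∀ t ∈ path.flatten, isHub path s → isHub path t → s = t

instance (path : List (List Int)) : Decidable (Pre_transportationHub path) := by
  unfold Pre_transportationHub rowsOK isHub; infer_instance

def pvWitness_transportationHub : List (List Int) := [[1, 2], [3, 2], [1, 3]]

def Spec_transportationHub (path : List (List Int)) (out : Int) : Prop := out = transportationHub_alt path
instance (path : List (List Int)) (out : Int) : Decidable (Spec_transportationHub path out) := by unfold Spec_transportationHub; infer_instance

-- ===== CLAIM (what is proved, stated in full; the proofs are below) =====
def Claim_equal_transportationHub : Prop := ∀ (path : List (List Int)), Dom_transportationHub path → Pre_transportationHub path → Spec_transportationHub path (transportationHub path)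

-- ===== LEMMAS AND PROOFS =====

def Sof (path : List (List Int)) : List Int := path.map (fun p => (pairOf p).1)
def Eof (path : List (List Int)) : List Int := path.map (fun p => (pairOf p).2)
def interOf (path : List (List Int)) : List Int :=
  path.flatMap (fun p => [(pairOf p).1, (pairOf p).2])

-- the hub predicate both programs decide (n = number of distinct stations)
def Hub (path : List (List Int)) (s : Int) : Prop :=
  s ∈ interOf path ∧
  ((Eof path).count s : Int) = ((PySem.Set.ofList (interOf path)).length : Int) - 1 ∧
  (Sof path).count s = 0

lemma foldA_spec (path : List (List Int)) (d o : Int → Int) (s0 : PySem.Set Int) :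
    (path.foldl
      (fun (st : (Int → Int) × (Int → Int) × PySem.Set Int) p =>
        ((fun x => if x = PySem.Int.mod (pairOf p).2 1000 then st.1 x + 1 else st.1 x),
         (fun x => if x = PySem.Int.mod (pairOf p).1 1000 then st.2.1 x + 1 else st.2.1 x),
         (st.2.2.add (pairOf p).1).add (pairOf p).2))
      (d, o, s0)) =
    ((fun x => d x + (((Eof path).map (fun e => PySem.Int.mod e 1000)).count x : Int)),
     (fun x => o x + (((Sof path).map (fun e => PySem.Int.mod e 1000)).count x : Int)),
     PySem.Set.update s0 (interOf path)) := by
  induction path generalizing d o s0 with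
  | nil => simp [Eof, Sof, interOf]
  | cons p rest ih =>
    simp only [List.foldl_cons]
    rw [ih]
    refine Prod.ext ?_ (Prod.ext ?_ ?_)
    · funext x
      simp only [Eof, List.map_cons, List.count_cons, beq_iff_eq]
      split_ifs with h <;> push_cast <;> omega
    · funext x
      simp only [Sof, List.map_cons, List.count_cons, beq_iff_eq]
      split_ifs with h <;> push_cast <;> omega
    · rfl

lemma dropWhile_ne (v : Int) (t : List Int) (ht : t.Pairwise (· ≤ ·))
    (hvle : ∀ x ∈ t, v ≤ x) : ∀ w ∈ t.dropWhile (· == v), w ≠ v := by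
  intro w hw
  rcases hd : t.dropWhile (· == v) with _ | ⟨u, r⟩
  · simp [hd] at hw
  · have hune : ¬((fun x => x == v) u) := by
      have := List.head_dropWhile_not (fun x => x == v) (l := t) (by simp [hd])
      simpa [hd] using this
    have hune' : u ≠ v := by simpa using hune
    have hsub : (t.dropWhile (· == v)).Sublist t := List.dropWhile_sublist _
    have hpw : (t.dropWhile (· == v)).Pairwise (· ≤ ·) := ht.sublist hsub
    have hu : u ∈ t := hsub.mem (by rw [hd]; exact List.mem_cons_self ..)
    rw [hd] at hw hpw
    rcases List.mem_cons.mp hw with hw | hw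
    · exact hw ▸ hune'
    · intro hwv
      have h1 : u ≤ w := (List.pairwise_cons.mp hpw).1 w hw
      have h2 : v ≤ u := hvle u hu
      exact hune' (le_antisymm (hwv ▸ h1) h2)

lemma count_facts (v : Int) (t : List Int) (ht : t.Pairwise (· ≤ ·))
    (hvle : ∀ x ∈ t, v ≤ x) :
    (v :: t).count v = 1 + (t.takeWhile (· == v)).length ∧
    (∀ w ∈ t.dropWhile (· == v), (v :: t).count w = (t.dropWhile (· == v)).count w) := by
  have htw : ∀ x ∈ t.takeWhile (· == v), x = v := by
    intro x hx
    simpa using List.mem_takeWhile_imp hx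
  have hdw := dropWhile_ne v t ht hvle
  have hsplit : t.count v = (t.takeWhile (· == v)).count v + (t.dropWhile (· == v)).count v := by
    conv_lhs => rw [← List.takeWhile_append_dropWhile (p := (· == v)) (l := t)]
    exact List.count_append ..
  constructor
  · have h1 : (t.takeWhile (· == v)).count v = (t.takeWhile (· == v)).length :=
      List.count_eq_length.mpr (by intro b hb; exact (htw b hb).symm)
    have h2 : (t.dropWhile (· == v)).count v = 0 :=
      List.count_eq_zero.mpr (fun h => hdw v h rfl)
    simp [hsplit, h1, h2]
    omega
  · intro w hw
    have hwv : w ≠ v := hdw w hw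
    have hsplitw : t.count w = (t.takeWhile (· == v)).count w + (t.dropWhile (· == v)).count w := by
      conv_lhs => rw [← List.takeWhile_append_dropWhile (p := (· == v)) (l := t)]
      exact List.count_append ..
    have h1 : (t.takeWhile (· == v)).count w = 0 :=
      List.count_eq_zero.mpr (fun h => hwv (htw w h))
    simp [List.count_cons, hsplitw, h1]
    exact fun h => hwv h.symm

lemma find?_congr_mem {p q : Int → Bool} (l : List Int) (h : ∀ a ∈ l, p a = q a) :
    l.find? p = l.find? q := by
  induction l with
  | nil => rfl
  | cons a t ih =>
    rw [List.find?_cons, List.find?_cons, h a (List.mem_cons_self ..),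
        ih (fun b hb => h b (List.mem_cons_of_mem _ hb))]

lemma runScan_spec (starts : PySem.Set Int) (n : Int) (l : List Int)
    (hs : l.Pairwise (· ≤ ·)) :
    (∃ v ∈ l, (l.count v : Int) = n - 1 ∧ starts.contains v = false ∧ runScan starts n l = v)
    ∨ ((∀ v ∈ l, ¬((l.count v : Int) = n - 1 ∧ starts.contains v = false)) ∧
        runScan starts n l = -1) := by
  revert hs
  induction l using runScan.induct starts n with
  | case1 => intro _; right; simp [runScan]
  | case2 v t hcond =>
    intro hs
    obtain ⟨hvle, ht⟩ := List.pairwise_cons.mp hs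
    obtain ⟨hcnt, _⟩ := count_facts v t ht hvle
    left
    refine ⟨v, List.mem_cons_self .., ?_, ?_, ?_⟩
    · rw [hcnt]; have := (Bool.and_eq_true ..).mp hcond |>.1
      have := beq_iff_eq.mp this
      push_cast; omega
    · have := (Bool.and_eq_true ..).mp hcond |>.2
      simpa using this
    · rw [runScan, if_pos hcond]
  | case3 v t hcond ih =>
    intro hs
    obtain ⟨hvle, ht⟩ := List.pairwise_cons.mp hs
    obtain ⟨hcnt, hcw⟩ := count_facts v t ht hvle
    have htw : ∀ x ∈ t.takeWhile (· == v), x = v := by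
      intro x hx; simpa using List.mem_takeWhile_imp hx
    have hdwpw : (t.dropWhile (· == v)).Pairwise (· ≤ ·) :=
      ht.sublist (List.dropWhile_sublist _)
    have hrs : runScan starts n (v :: t) = runScan starts n (t.dropWhile (· == v)) := by
      rw [runScan, if_neg hcond]
    have hnotv : ¬(((v :: t).count v : Int) = n - 1 ∧ starts.contains v = false) := by
      rintro ⟨h1, h2⟩
      apply hcond
      rw [hcnt] at h1
      simp only [Bool.and_eq_true, beq_iff_eq, Bool.not_eq_true', h2]
      constructor
      · push_cast at h1 ⊢; omega
      · trivial
    rcases ih hdwpw with ⟨w, hw, hc1, hc2, hc3⟩ | ⟨hall, hres⟩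
    · left
      refine ⟨w, ?_, ?_, hc2, by rw [hrs]; exact hc3⟩
      · exact List.mem_cons_of_mem _ ((List.dropWhile_sublist _).mem hw)
      · rw [hcw w hw]; exact hc1
    · right
      refine ⟨?_, by rw [hrs]; exact hres⟩
      intro w hw
      rcases List.mem_cons.mp hw with rfl | hw'
      · exact hnotv
      · rcases (List.mem_append.mp (by
            rw [List.takeWhile_append_dropWhile (p := (· == v)) (l := t)]; exact hw')) with h | h
        · have : w = v := htw w h
          subst this; exact hnotv
        · rw [hcw w h]; exact hall w h

lemma pairOf_pair (a b : Int) : pairOf [a, b] = (a, b) := rfl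

lemma rowShape (p : List Int) (h : p.length = 2) : p = [(pairOf p).1, (pairOf p).2] := by
  obtain ⟨a, b, rfl⟩ := List.length_eq_two.mp h
  rfl

lemma flatten_eq (path : List (List Int)) (hrows : ∀ p ∈ path, p.length = 2) :
    path.flatten = interOf path := by
  induction path with
  | nil => rfl
  | cons p rest ih =>
    have hp := rowShape p (hrows p (List.mem_cons_self ..))
    simp only [List.flatten_cons, interOf, List.flatMap_cons]
    rw [ih (fun q hq => hrows q (List.mem_cons_of_mem _ hq))]
    conv_lhs => rw [hp]
    rfl

lemma mem_interOf (path : List (List Int)) (x : Int) :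
    x ∈ interOf path ↔ x ∈ Sof path ∨ x ∈ Eof path := by
  simp only [interOf, List.mem_flatMap, Sof, Eof, List.mem_map]
  constructor
  · rintro ⟨p, hp, hx⟩
    rcases List.mem_cons.mp hx with rfl | hx
    · exact Or.inl ⟨p, hp, rfl⟩
    · simp only [List.mem_singleton] at hx
      exact Or.inr ⟨p, hp, hx.symm⟩
  · rintro (⟨p, hp, rfl⟩ | ⟨p, hp, rfl⟩)
    · exact ⟨p, hp, by simp⟩
    · exact ⟨p, hp, by simp⟩

lemma len_eq_of_nodup_mem (l1 l2 : List Int) (h1 : l1.Nodup) (h2 : l2.Nodup)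
    (h : ∀ x, x ∈ l1 ↔ x ∈ l2) : l1.length = l2.length := by
  rw [← List.toFinset_card_of_nodup h1, ← List.toFinset_card_of_nodup h2]
  congr 1
  exact Finset.ext (by simp [h])

lemma isHub_iff (path : List (List Int)) (hrows : ∀ p ∈ path, p.length = 2) (s : Int) :
    isHub path s ↔
      (((Eof path).count s : Int) = ((PySem.Set.ofList (interOf path)).length : Int) - 1
       ∧ (Sof path).count s = 0) := by
  have hE : (Eof path).count s = path.countP (fun p => (p.drop 1).headD 0 == s) := by
    rw [List.count_eq_countP, Eof, List.countP_map]
    apply List.countP_congr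
    intro p hp
    rw [rowShape p (hrows p hp)]
    simp [pairOf_pair]
  have hS : (Sof path).count s = path.countP (fun p => p.headD 0 == s) := by
    rw [List.count_eq_countP, Sof, List.countP_map]
    apply List.countP_congr
    intro p hp
    rw [rowShape p (hrows p hp)]
    simp [pairOf_pair]
  have hlen : (PySem.List.dedup path.flatten).length = (PySem.Set.ofList (interOf path)).length := by
    rw [flatten_eq path hrows, PySem.List.dedup_eq_ofList]
  unfold isHub
  rw [hE, hS, hlen]

lemma hub_unique (path : List (List Int)) (hrows : ∀ p ∈ path, p.length = 2)
    (huniq : ∀ s ∈ path.flatten, ∀ t ∈ path.flatten, isHub path s → isHub path t → s = t)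
    (s t : Int) (hs : Hub path s) (ht : Hub path t) : s = t := by
  obtain ⟨hsm, hs1, hs2⟩ := hs
  obtain ⟨htm, ht1, ht2⟩ := ht
  have hfl : path.flatten = interOf path := flatten_eq path hrows
  exact huniq s (by rw [hfl]; exact hsm) t (by rw [hfl]; exact htm)
    ((isHub_iff path hrows s).mpr ⟨hs1, hs2⟩) ((isHub_iff path hrows t).mpr ⟨ht1, ht2⟩)

lemma hub_mem_E (path : List (List Int)) (s : Int) (h : Hub path s) : s ∈ Eof path := by
  obtain ⟨hm, h1, h2⟩ := h
  by_contra hne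
  have hc0 : (Eof path).count s = 0 := List.count_eq_zero.mpr hne
  rw [hc0] at h1
  have hlen : ((PySem.Set.ofList (interOf path)).length : Int) = 1 := by omega
  have hmem : s ∈ PySem.Set.ofList (interOf path) := (PySem.Set.mem_ofList ..).mpr hm
  obtain ⟨a, ha⟩ := List.length_eq_one_iff.mp (by exact_mod_cast hlen)
  rw [ha] at hmem
  have has : a = s := (List.mem_singleton.mp hmem).symm
  subst has
  -- every station equals a, in particular every start; but a has no outgoing edge
  have hallA : ∀ x ∈ interOf path, x = a := by
    intro x hx
    have : x ∈ PySem.Set.ofList (interOf path) := (PySem.Set.mem_ofList ..).mpr hx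
    rw [ha] at this
    simpa using this
  have hSempty : Sof path = [] := by
    rcases hSl : Sof path with _ | ⟨x, r⟩
    · rfl
    · exfalso
      have hxS : x ∈ Sof path := by rw [hSl]; exact List.mem_cons_self ..
      have hxI : x ∈ interOf path := (mem_interOf path x).mpr (Or.inl hxS)
      have : x = a := hallA x hxI
      subst this
      have : (Sof path).count x ≠ 0 := by
        rw [hSl]; simp
      exact this h2
  have : path = [] := by
    have := congrArg List.length hSempty
    simpa [Sof] using this
  subst this
  simp [interOf] at hm

-- ===== VERDICT (by name: the statement is the Claim_ definition above) =====
theorem transportationHub_spec : Claim_equal_transportationHub := by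
  intro path _ hPre
  obtain ⟨hrowsAll, hmodinj, huniq⟩ := hPre
  have hrows : ∀ p ∈ path, p.length = 2 := fun p hp => (hrowsAll p hp).1
  unfold Spec_transportationHub transportationHub transportationHub_alt
  rw [foldA_spec]
  simp only [zero_add, PySem.List.len_eq]
  have hmapS : path.map (fun p => (pairOf p).1) = Sof path := rfl
  have hmapE : path.map (fun p => (pairOf p).2) = Eof path := rfl
  rw [hmapS, hmapE]
  -- name the pieces
  set nodes := PySem.Set.ofList (interOf path) with hnodes
  have hstation : PySem.Set.update PySem.Set.empty (interOf path) = nodes := rfl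
  rw [hstation]
  set E := Eof path
  set S := Sof path
  set sortedE := PySem.List.sorted E (fun x => x) false with hsE
  have hpermE : sortedE.Perm E := PySem.List.sorted_perm ..
  have hmemSE : ∀ x, x ∈ sortedE ↔ x ∈ E := fun x => PySem.List.mem_sorted ..
  have hcntSE : ∀ x, sortedE.count x = E.count x := fun x => hpermE.count_eq x
  have hn : ((PySem.Set.ofList S).union (PySem.Set.ofList sortedE)).length = nodes.length := by
    apply len_eq_of_nodup_mem
    · exact PySem.Set.nodup_union _ _ (PySem.Set.nodup_ofList _)
    · exact PySem.Set.nodup_ofList _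
    · intro x
      rw [PySem.Set.mem_union, PySem.Set.mem_ofList, PySem.Set.mem_ofList,
          PySem.Set.mem_ofList, hmemSE x]
      exact (mem_interOf path x).symm
  rw [hn]
  set nI : Int := (nodes.length : Int) with hnI
  -- characterize the B side
  have hcontains : ∀ x, (PySem.Set.ofList S).contains x = false ↔ S.count x = 0 := by
    intro x
    rw [List.count_eq_zero]
    constructor
    · intro h hx
      have := (PySem.Set.contains_iff (PySem.Set.ofList S) x).mpr ((PySem.Set.mem_ofList ..).mpr hx)
      rw [h] at this; cases this
    · intro h
      by_contra hc
      have : (PySem.Set.ofList S).contains x = true := by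
        cases hcc : (PySem.Set.ofList S).contains x
        · exact absurd hcc hc
        · rfl
      exact h ((PySem.Set.mem_ofList ..).mp ((PySem.Set.contains_iff ..).mp this))
  have hBspec := runScan_spec (PySem.Set.ofList S) nI sortedE
    (by simpa using PySem.List.sorted_pairwise E (fun x => x))
  -- degree slots: mod-1000 is injective on the stations, so the slot counts are the id counts
  have hflat : path.flatten = interOf path := flatten_eq path hrows
  have hinj : ∀ a ∈ interOf path, ∀ b ∈ interOf path,
      PySem.Int.mod a 1000 = PySem.Int.mod b 1000 → a = b := by
    intro a ha b hb
    exact hmodinj a (by rw [hflat]; exact ha) b (by rw [hflat]; exact hb)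
  have hEsub : ∀ e ∈ E, e ∈ interOf path := fun e he => (mem_interOf path e).mpr (Or.inr he)
  have hSsub : ∀ e ∈ S, e ∈ interOf path := fun e he => (mem_interOf path e).mpr (Or.inl he)
  have hbridge : ∀ (l : List Int), (∀ e ∈ l, e ∈ interOf path) → ∀ s ∈ interOf path,
      (l.map (fun e => PySem.Int.mod e 1000)).count (PySem.Int.mod s 1000) = l.count s := by
    intro l hl s hs
    rw [List.count_eq_countP, List.count_eq_countP, List.countP_map]
    apply List.countP_congr
    intro e he
    simp only [Function.comp, beq_iff_eq]
    exact ⟨fun h => hinj e (hl e he) s hs h, fun h => by rw [h]⟩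
  rw [find?_congr_mem nodes (q := fun s => ((E.count s : Int) == nI - 1 && (S.count s : Int) == 0))
      (by
        intro a ha
        have haI : a ∈ interOf path := (PySem.Set.mem_ofList ..).mp ha
        rw [hbridge E hEsub a haI, hbridge S hSsub a haI])]
  -- case on A's scan
  rcases hf : nodes.find? (fun s => ((E.count s : Int) == nI - 1 && (S.count s : Int) == 0)) with _ | s
  · -- A finds nothing: no hub exists
    have hnone := List.find?_eq_none.mp hf
    rcases hBspec with ⟨w, hw, hc1, hc2, hc3⟩ | ⟨_, hres⟩
    · exfalso
      have hwI : w ∈ interOf path := (mem_interOf path w).mpr (Or.inr ((hmemSE w).mp hw))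
      have hwn : w ∈ nodes := (PySem.Set.mem_ofList ..).mpr hwI
      apply hnone w hwn
      rw [hcntSE w] at hc1
      simp only [Bool.and_eq_true, beq_iff_eq]
      exact ⟨hc1, by simp [(hcontains w).mp hc2]⟩
    · rw [hres]
  · -- A finds s: s is the unique hub, and B finds it too
    have hps := List.find?_some hf
    simp only [Bool.and_eq_true, beq_iff_eq] at hps
    have hsmem : s ∈ interOf path := (PySem.Set.mem_ofList ..).mp (List.mem_of_find?_eq_some hf)
    have hHub : Hub path s := ⟨hsmem, hps.1, by exact_mod_cast hps.2⟩
    rcases hBspec with ⟨w, hw, hc1, hc2, hc3⟩ | ⟨hall, hres⟩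
    · rw [hc3]
      have hwHub : Hub path w := by
        refine ⟨(mem_interOf path w).mpr (Or.inr ((hmemSE w).mp hw)), ?_, (hcontains w).mp hc2⟩
        rw [← hcntSE w]; exact hc1
      exact hub_unique path hrows huniq s w hHub hwHub
    · exfalso
      have hsE' : s ∈ sortedE := (hmemSE s).mpr (hub_mem_E path s hHub)
      apply hall s hsE'
      refine ⟨by rw [hcntSE s]; exact hHub.2.1, (hcontains s).mpr hHub.2.2⟩
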